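-- pv_equiv track=rewrite | github.com/talvola/generic_poker | tools/compare_two_card_high_high.py | is_pair
-- ===== SOURCE A (Python) =====
-- def is_pair(values):
--     """Check if the values contain a pair and return the pair value."""
--     value_counts = {}
--     for val in values:
--         value_counts[val] = value_counts.get(val, 0) + 1
--
--     pairs = [(val, count) for val, count in value_counts.items() if count >= 2]
--     if pairs:
--         # Return highest pair
--         return True, max([val for val, count in pairs])
--     return False, None
-- ===== SOURCE B (Python) =====
-- def is_pair(values):
--     """Check if the values contain a pair and return the pair value."""
--     s = sorted(values, reverse=True)
--     for a, b in zip(s, s[1:]):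
--         if a == b:
--             return True, a
--     return False, None
-- ===== Notes on version B (the rewrite author's own statement) =====
-- stated objective: alternative
-- what changed: Replaced the dict-of-counts plus filter-and-max scan by a descending sort followed by a single adjacent-equality scan: the first adjacent equal pair in the sorted list is the highest duplicated value.
import Mathlib
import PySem

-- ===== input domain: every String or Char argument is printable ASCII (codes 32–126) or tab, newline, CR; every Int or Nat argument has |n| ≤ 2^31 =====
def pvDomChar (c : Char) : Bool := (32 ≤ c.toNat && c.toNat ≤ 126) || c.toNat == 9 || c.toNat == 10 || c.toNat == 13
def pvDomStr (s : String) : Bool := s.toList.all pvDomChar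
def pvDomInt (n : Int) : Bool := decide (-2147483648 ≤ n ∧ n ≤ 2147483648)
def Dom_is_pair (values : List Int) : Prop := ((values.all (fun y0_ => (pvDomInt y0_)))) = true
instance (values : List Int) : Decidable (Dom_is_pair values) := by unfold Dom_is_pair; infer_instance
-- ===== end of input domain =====

-- B replaces A's dict-of-counts + filter + max by a descending sort and one adjacent-equality scan (return value only; neither mutates its argument).

-- ===== PORT A =====
def is_pair (values : List Int) : Bool × Option Int :=
  let value_counts := values.foldl (fun d v => d.insert v (d.getD v 0 + 1)) (PySem.Dict.empty : PySem.Dict Int Int)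
  let pairs := value_counts.items.filter (fun p => decide (2 ≤ p.2))
  if pairs ≠ [] then (true, PySem.List.max? (pairs.map (·.1)) (fun x => x))
  else (false, none)

-- ===== PORT B =====
-- B's early-returning 'for a, b in zip(s, s[1:])' loop: first adjacent equal pair, or none
def findAdj : List Int → Option Int
  | a :: b :: t => if a = b then some a else findAdj (b :: t)
  | _ => none

def is_pair_alt (values : List Int) : Bool × Option Int :=
  match findAdj (PySem.List.sorted values (fun x => x) true) with
  | some v => (true, some v)
  | none => (false, none)

-- ===== PRECONDITION & SPEC =====
def Spec_is_pair (values : List Int) (out : Bool × Option Int) : Prop := out = is_pair_alt values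
instance (values : List Int) (out : Bool × Option Int) : Decidable (Spec_is_pair values out) := by unfold Spec_is_pair; infer_instance

-- ===== CLAIM (what is proved, stated in full; the proofs are below) =====
def Claim_equal_is_pair : Prop := ∀ (values : List Int), Dom_is_pair values → Spec_is_pair values (is_pair values)

-- ===== LEMMAS AND PROOFS =====

-- On a descending list, findAdj = none exactly when the list has no duplicates
theorem findAdj_eq_none_iff (l : List Int) (hp : l.Pairwise (fun a b => b ≤ a)) :
    findAdj l = none ↔ l.Nodup := by
  induction l with
  | nil => simp [findAdj]
  | cons a t ih =>
    cases t with
    | nil => simp [findAdj]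
    | cons b t' =>
      rcases List.pairwise_cons.mp hp with ⟨ha, hp'⟩
      rcases List.pairwise_cons.mp hp' with ⟨hb, _⟩
      by_cases hab : a = b
      · subst hab
        simp [findAdj]
      · simp only [findAdj, if_neg hab, ih hp', List.nodup_cons]
        constructor
        · intro h
          refine ⟨?_, h⟩
          intro hmem
          rcases List.mem_cons.mp hmem with h1 | h2
          · exact hab h1
          · have h3 : a ≤ b := hb a h2
            have h4 : b ≤ a := ha b (by simp)
            exact hab (le_antisymm h3 h4)
        · exact fun h => h.2

-- On a descending list, findAdj = some v means v is the largest value occurring at least twice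
theorem findAdj_eq_some (l : List Int) (hp : l.Pairwise (fun a b => b ≤ a)) (v : Int)
    (h : findAdj l = some v) :
    2 ≤ l.count v ∧ ∀ w, 2 ≤ l.count w → w ≤ v := by
  induction l with
  | nil => simp [findAdj] at h
  | cons a t ih =>
    cases t with
    | nil => simp [findAdj] at h
    | cons b t' =>
      rcases List.pairwise_cons.mp hp with ⟨ha, hp'⟩
      rcases List.pairwise_cons.mp hp' with ⟨hb, _⟩
      by_cases hab : a = b
      · subst hab
        have hv : a = v := by simpa [findAdj] using h
        subst hv
        constructor
        · simp
        · intro w _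
          by_cases hw : w = a
          · exact le_of_eq hw
          · -- w occurs in the tail, so w ≤ a by descending order
            rename_i hcnt
            have : w ∈ a :: a :: t' := by
              have := List.count_pos_iff.mp (by omega : 0 < (a :: a :: t').count w)
              exact this
            rcases List.mem_cons.mp this with h1 | h1
            · exact le_of_eq h1
            rcases List.mem_cons.mp h1 with h2 | h2
            · exact le_of_eq h2
            · exact hb w h2
      · simp only [findAdj, if_neg hab] at h
        have hanotin : a ∉ b :: t' := by
          intro hmem
          rcases List.mem_cons.mp hmem with h1 | h2
          · exact hab h1
          · exact hab (le_antisymm (hb a h2) (ha b (by simp)))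
        rcases ih hp' h with ⟨hc, hmax⟩
        have hav : a ≠ v := by
          intro he
          subst he
          exact hanotin (List.count_pos_iff.mp (by omega))
        constructor
        · rw [List.count_cons_of_ne (fun he => hav he)]
          exact hc
        · intro w hw
          by_cases hwa : w = a
          · subst hwa
            rw [List.count_cons_self] at hw
            have : w ∈ b :: t' := List.count_pos_iff.mp (by omega)
            exact absurd this hanotin
          · rw [List.count_cons_of_ne (fun he => hwa he.symm)] at hw
            exact hmax w hw

-- the deduplicated list of values occurring at least twice, as A computes it
theorem pairs_map_fst (values : List Int) :
    ((values.foldl (fun d v => d.insert v (d.getD v 0 + 1)) (PySem.Dict.empty : PySem.Dict Int Int)).items.filter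
        (fun p => decide (2 ≤ p.2))).map (·.1)
      = (PySem.Set.ofList values).filter (fun k => decide (2 ≤ (values.count k : Int))) := by
  rw [PySem.Dict.foldl_insert_getD_add_one_eq_counter, PySem.Dict.items_counter]
  rw [List.filter_map, List.map_map]
  simp [Function.comp_def]

-- ===== VERDICT (by name: the statement is the Claim_ definition above) =====
theorem is_pair_spec : Claim_equal_is_pair := by
  intro values _
  unfold Spec_is_pair is_pair is_pair_alt
  have hperm : (PySem.List.sorted values (fun x => x) true).Perm values :=
    PySem.List.sorted_perm values (fun x => x) true
  have hpw : (PySem.List.sorted values (fun x => x) true).Pairwise (fun a b => b ≤ a) :=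
    PySem.List.sorted_pairwise_rev values (fun x => x)
  set s := PySem.List.sorted values (fun x => x) true with hs
  have hcount : ∀ w : Int, s.count w = values.count w := fun w => hperm.count_eq w
  set dups := (PySem.Set.ofList values).filter (fun k => decide (2 ≤ (values.count k : Int))) with hd
  have hmem_dups : ∀ w : Int, w ∈ dups ↔ w ∈ values ∧ 2 ≤ values.count w := by
    intro w
    rw [hd, List.mem_filter, PySem.Set.mem_ofList]
    constructor
    · rintro ⟨h1, h2⟩; exact ⟨h1, by exact_mod_cast of_decide_eq_true h2⟩
    · rintro ⟨h1, h2⟩; exact ⟨h1, decide_eq_true (by exact_mod_cast h2)⟩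
  cases hfa : findAdj s with
  | none =>
    -- no duplicates: s Nodup, so values Nodup, so dups = [], so pairs = []
    have hnd : values.Nodup := hperm.nodup_iff.mp ((findAdj_eq_none_iff s hpw).mp hfa)
    have hdups : dups = [] := by
      rw [List.eq_nil_iff_forall_not_mem]
      intro w hw
      rcases (hmem_dups w).mp hw with ⟨_, h2⟩
      have := List.nodup_iff_count_le_one.mp hnd w
      omega
    have hpairs : ((values.foldl (fun d v => d.insert v (d.getD v 0 + 1)) (PySem.Dict.empty : PySem.Dict Int Int)).items.filter
        (fun p => decide (2 ≤ p.2))) = [] := by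
      have := pairs_map_fst values
      rw [← hd, hdups] at this
      exact List.map_eq_nil_iff.mp this
    simp [hpairs]
  | some v =>
    rcases findAdj_eq_some s hpw v hfa with ⟨hc, hmax⟩
    rw [hcount] at hc
    have hvdups : v ∈ dups := (hmem_dups v).mpr ⟨List.count_pos_iff.mp (by omega), hc⟩
    have hpairs_ne : ((values.foldl (fun d v => d.insert v (d.getD v 0 + 1)) (PySem.Dict.empty : PySem.Dict Int Int)).items.filter
        (fun p => decide (2 ≤ p.2))) ≠ [] := by
      intro h
      have := pairs_map_fst values
      rw [← hd, h] at this
      rw [← this] at hvdups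
      simp at hvdups
    rw [if_pos hpairs_ne]
    rw [pairs_map_fst values, ← hd]
    -- max? dups = some v
    cases hm : PySem.List.max? dups (fun x => x) with
    | none =>
      rw [PySem.List.max?_eq_none_iff] at hm
      rw [hm] at hvdups
      simp at hvdups
    | some m =>
      have hmmem : m ∈ dups := PySem.List.max?_mem hm
      rcases (hmem_dups m).mp hmmem with ⟨hmval, hm2⟩
      have h1 : v ≤ m := PySem.List.max?_isMax hm v hvdups
      have h2 : m ≤ v := hmax m (by rw [hcount]; exact hm2)
      rw [le_antisymm h2 h1]
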